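-- pv_equiv track=rewrite | github.com/andrewfhou/AdventOfCode-2018 | day05/dayFive.py | partOne
-- ===== SOURCE A (Python) =====
-- def partOne(inputs):
--     i = 0
--     while i < len(inputs) - 1:
--         j = i + 1
--         if inputs[i] != inputs[j] and inputs[i].upper() == inputs[j].upper():
--             inputs = inputs[:i] + inputs[i+2:]
--             i = max(0, i-1)
--         else:
--             i += 1
--
--     return len(inputs)
-- ===== SOURCE B (Python) =====
-- def partOne(inputs):
--     stack = []
--     for c in inputs:
--         if stack and stack[-1] != c and stack[-1].upper() == c.upper():
--             stack.pop()
--         else: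
--             stack.append(c)
--     return len(stack)
-- ===== Notes on version B (the rewrite author's own statement) =====
-- stated objective: faster
-- what changed: Replaced the backtracking scan that rebuilds the string by slicing on every reaction with a single left-to-right pass over the characters maintaining a stack (push, or pop when the new char reacts with the top).
import Mathlib
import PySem

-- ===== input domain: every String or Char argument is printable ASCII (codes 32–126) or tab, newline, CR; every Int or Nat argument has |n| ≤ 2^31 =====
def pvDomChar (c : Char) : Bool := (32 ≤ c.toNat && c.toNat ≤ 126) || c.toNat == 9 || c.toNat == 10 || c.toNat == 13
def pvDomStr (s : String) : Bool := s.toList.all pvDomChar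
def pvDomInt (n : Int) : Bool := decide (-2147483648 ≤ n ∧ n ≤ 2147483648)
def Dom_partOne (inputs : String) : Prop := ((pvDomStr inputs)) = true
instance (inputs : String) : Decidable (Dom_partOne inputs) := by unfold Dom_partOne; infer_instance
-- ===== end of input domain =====

-- B replaces A's backtracking rescan (string rebuilt by slicing at every reaction) with a
-- one-pass reduction stack; objective: faster (asymptotic).

-- ===== PORT A =====
-- A's while-loop: i is a Python int that stays ≥ 0 (it only ever does i+1 or max(0,i-1)),
-- so it is ported as a Nat, where `i - 1` is exactly `max(0, i-1)`.
-- `inputs[i] != inputs[j] and inputs[i].upper() == inputs[j].upper()` is the reaction test;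
-- `.upper()` on a 1-char string is PySem.Chars.upperChar.
-- fuel = 2*len+1 only makes the recursion structural (each step does i+1, or removes two
-- chars and does i-1, so 2*len - i strictly decreases); the 0-fuel branch is never reached.
def partOneLoop : Nat → List Char → Nat → Nat
  | 0, l, _ => l.length
  | fuel+1, l, i =>
    if h : i + 1 < l.length then
      if decide (l[i]'(by omega) ≠ l[i+1]'h) &&
         (PySem.Chars.upperChar (l[i]'(by omega)) == PySem.Chars.upperChar (l[i+1]'h)) then
        partOneLoop fuel (l.take i ++ l.drop (i+2)) (i - 1)
      else
        partOneLoop fuel l (i+1)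
    else l.length

def partOne (inputs : String) : Int :=
  (partOneLoop (2 * inputs.toList.length + 1) inputs.toList 0 : Int)

-- ===== PORT B =====
-- Source B's stack, top of stack at the head of the list (Python appends/pops at the end).
def partOneStep (st : List Char) (c : Char) : List Char :=
  match st with
  | t :: rest =>
      if decide (t ≠ c) && (PySem.Chars.upperChar t == PySem.Chars.upperChar c) then rest
      else c :: t :: rest
  | [] => [c]

def partOne_alt (inputs : String) : Int :=
  ((inputs.toList.foldl partOneStep []).length : Int)

-- ===== PRECONDITION & SPEC =====
def Spec_partOne (inputs : String) (out : Int) : Prop := out = partOne_alt inputs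
instance (inputs : String) (out : Int) : Decidable (Spec_partOne inputs out) := by unfold Spec_partOne; infer_instance

-- ===== CLAIM (what is proved, stated in full; the proofs are below) =====
def Claim_equal_partOne : Prop := ∀ (inputs : String), Dom_partOne inputs → Spec_partOne inputs (partOne inputs)

-- ===== LEMMAS AND PROOFS =====

-- Starting the fold with the first character already on the stack is the same as starting empty.
lemma foldl_step_start (R : List Char) :
    List.foldl partOneStep ((R.take 1).reverse) (R.drop 1) = List.foldl partOneStep [] R := by
  cases R with
  | nil => rfl
  | cons c R' => simp [partOneStep]

-- Trace correspondence: A's loop state (l, i) is the fold with stack = reverse of l[:i+1]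
-- and remaining input l[i+1:].
lemma loop_eq_fold (fuel : Nat) (l : List Char) (i : Nat)
    (hf : 2 * l.length ≤ fuel + i) (hi : i < l.length ∨ l = []) :
    partOneLoop fuel l i =
      (List.foldl partOneStep ((l.take (i+1)).reverse) (l.drop (i+1))).length := by
  induction fuel generalizing l i with
  | zero =>
    -- with the fuel bound the guard is already false here
    have hle : l.length ≤ i + 1 := by rcases hi with hi | hi <;> [omega; simp [hi]]
    rw [partOneLoop, List.take_of_length_le hle, List.drop_eq_nil_of_le hle]
    simp
  | succ fuel ih =>
    rw [partOneLoop]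
    by_cases h : i + 1 < l.length
    · rw [dif_pos h]
      have h1 : l.take (i+1) = l.take i ++ [l[i]'(by omega)] := by
        rw [List.take_add_one]; simp [List.getElem?_eq_getElem (by omega : i < l.length)]
      have h2 : l.drop (i+1) = l[i+1]'h :: l.drop (i+2) := by
        rw [List.drop_eq_getElem_cons h]
      by_cases hr : (decide (l[i]'(by omega) ≠ l[i+1]'h) &&
          (PySem.Chars.upperChar (l[i]'(by omega)) == PySem.Chars.upperChar (l[i+1]'h))) = true
      · -- reaction: A removes l[i], l[i+1]; the fold pops the top of the stack
        rw [if_pos hr, h1, h2]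
        simp only [List.reverse_append, List.reverse_singleton, List.singleton_append,
          List.foldl_cons, partOneStep, hr, if_true]
        rcases Nat.eq_zero_or_pos i with hz | hp
        · subst hz
          rw [ih (l.take 0 ++ l.drop (0+2)) (0-1) (by simp; omega)
                (by cases hh : l.drop (0+2) with
                    | nil => right; simp
                    | cons a t => left; simp)]
          simp only [List.nil_append, Nat.zero_sub, Nat.zero_add, List.take_zero,
            List.reverse_nil]
          rw [foldl_step_start]
        · have hlen : (l.take i).length = i := by simp; omega
          have hidx : i - 1 + 1 = i := by omega
          have ht : ((l.take i ++ l.drop (i+2)).take (i-1+1)).reverse = (l.take i).reverse := by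
            rw [hidx, List.take_left' hlen]
          have hd : (l.take i ++ l.drop (i+2)).drop (i-1+1) = l.drop (i+2) := by
            rw [hidx, List.drop_left' hlen]
          rw [ih (l.take i ++ l.drop (i+2)) (i-1) (by simp; omega) (by left; simp; omega),
            ht, hd]
      · -- no reaction: A advances i; the fold pushes l[i+1]
        rw [if_neg hr]
        rw [ih l (i+1) (by omega) (by left; omega)]
        have h3 : l.take (i+1+1) = l.take (i+1) ++ [l[i+1]'h] := by
          rw [List.take_add_one]; simp [List.getElem?_eq_getElem h]
        have h2' : l.drop (i+1) = l[i+1]'h :: l.drop (i+1+1) := h2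
        rw [h3, h1, h2']
        rw [Bool.not_eq_true] at hr
        simp only [List.reverse_append, List.reverse_singleton, List.singleton_append,
          List.foldl_cons, partOneStep, hr]
        simp
    · -- loop exit: i+1 ≥ length, so the whole string is on the stack
      rw [dif_neg h]
      have hle : l.length ≤ i + 1 := by omega
      rw [List.take_of_length_le hle, List.drop_eq_nil_of_le hle]
      simp

-- ===== VERDICT (by name: the statement is the Claim_ definition above) =====
theorem partOne_spec : Claim_equal_partOne := by
  intro inputs _
  unfold Spec_partOne partOne partOne_alt
  congr 1
  have h0 : 0 < inputs.toList.length ∨ inputs.toList = [] := by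
    cases hh : inputs.toList with
    | nil => right; rfl
    | cons a t => left; simp
  rw [loop_eq_fold _ _ 0 (by omega) h0, foldl_step_start]
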